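-- pv_equiv track=rewrite | github.com/SantiRivera92/Penny-Dreadful-Tools | decksite/scrapers/gatherling.py | finishes
-- ===== SOURCE A (Python) =====
-- from typing import Any, Dict, List, Optional
--
-- def finishes(winners: Dict[str, int], ranks: List[str]) -> Dict[str, int]:
--     final = winners.copy()
--     r = len(final)
--     for p in ranks:
--         if p not in final.keys():
--             r += 1
--             final[p] = r
--     return final
-- ===== SOURCE B (Python) =====
-- def finishes(winners, ranks):
--     base = len(winners)
--     newidx = {}
--     for i, p in enumerate(ranks):
--         if p not in winners and p not in newidx:
--             newidx[p] = i
--     final = dict(winners)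
--     for p, i in newidx.items():
--         final[p] = base + sum(1 for j in newidx.values() if j <= i)
--     return final
-- ===== Notes on version B (the rewrite author's own statement) =====
-- stated objective: alternative
-- what changed: Eliminates A's sequential running-rank counter: B first records each newcomer's first-occurrence index in ranks, then computes every rank independently as len(winners) plus the COUNT of recorded first-occurrence indices not exceeding its own (rank by counting predecessors instead of a threaded counter).
import Mathlib
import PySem

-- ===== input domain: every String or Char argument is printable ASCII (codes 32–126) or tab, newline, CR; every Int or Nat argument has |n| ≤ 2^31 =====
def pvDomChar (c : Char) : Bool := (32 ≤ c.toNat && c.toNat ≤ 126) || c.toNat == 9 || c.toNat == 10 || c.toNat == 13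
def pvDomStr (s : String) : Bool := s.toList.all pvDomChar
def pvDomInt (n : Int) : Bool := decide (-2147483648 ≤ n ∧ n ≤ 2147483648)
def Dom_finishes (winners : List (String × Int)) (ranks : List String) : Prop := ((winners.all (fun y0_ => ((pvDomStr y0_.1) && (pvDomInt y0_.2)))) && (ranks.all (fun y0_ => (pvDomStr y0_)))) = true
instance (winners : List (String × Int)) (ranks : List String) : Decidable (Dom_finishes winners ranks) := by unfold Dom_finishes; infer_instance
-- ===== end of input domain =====

-- B removes A's threaded running-rank counter: it records each newcomer's first-occurrence
-- index and then computes every rank independently by counting indices ≤ its own (alternative).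

-- ===== PORT A =====
-- final = winners.copy(); r = len(final); for p in ranks: if p not in final: r += 1; final[p] = r
def finishes (winners : List (String × Int)) (ranks : List String) : List (String × Int) :=
  let final0 := PySem.Dict.ofList winners
  let st := ranks.foldl
    (fun (st : PySem.Dict String Int × Int) p =>
      if st.1.contains p then st else (st.1.insert p (st.2 + 1), st.2 + 1))
    (final0, (final0.size : Int))
  st.1.items

-- ===== PORT B =====
-- base = len(winners); newidx = {}; for i, p in enumerate(ranks): if p not in winners and
-- p not in newidx: newidx[p] = i; final = dict(winners);
-- for p, i in newidx.items(): final[p] = base + sum(1 for j in newidx.values() if j <= i)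
def finishes_alt (winners : List (String × Int)) (ranks : List String) : List (String × Int) :=
  let w := PySem.Dict.ofList winners
  let base : Int := w.size
  let newidx := (PySem.List.enumerate ranks 0).foldl
    (fun (d : PySem.Dict String Int) ip =>
      if !(w.contains ip.2) && !(d.contains ip.2) then d.insert ip.2 ip.1 else d)
    PySem.Dict.empty
  (newidx.items.foldl
    (fun (f : PySem.Dict String Int) pi =>
      f.insert pi.1 (base + ((newidx.values.filter (fun j => decide (j ≤ pi.2))).length : Int)))
    w).items

-- ===== PRECONDITION & SPEC =====
def Spec_finishes (winners : List (String × Int)) (ranks : List String) (out : List (String × Int)) : Prop := out = finishes_alt winners ranks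
instance (winners : List (String × Int)) (ranks : List String) (out : List (String × Int)) : Decidable (Spec_finishes winners ranks out) := by unfold Spec_finishes; infer_instance

-- ===== CLAIM (what is proved, stated in full; the proofs are below) =====
def Claim_equal_finishes : Prop := ∀ (winners : List (String × Int)) (ranks : List String), Dom_finishes winners ranks → Spec_finishes winners ranks (finishes winners ranks)

-- ===== LEMMAS AND PROOFS =====

-- spec of B's first loop: the (newcomer, first-occurrence index) pairs it appends
def news (w : PySem.Dict String Int) : List String → Int → PySem.Dict String Int → List (String × Int)
  | [], _, _ => []
  | p :: rest, i, d =>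
    if !(w.contains p) && !(d.contains p)
    then (p, i) :: news w rest (i + 1) (d.insert p i)
    else news w rest (i + 1) d

-- B's first loop appends exactly `news`
theorem items_fold_newidx (w : PySem.Dict String Int) (l : List String) :
    ∀ (i : Int) (d : PySem.Dict String Int),
      ((PySem.List.enumerate l i).foldl
        (fun (d : PySem.Dict String Int) ip =>
          if !(w.contains ip.2) && !(d.contains ip.2) then d.insert ip.2 ip.1 else d) d).items
      = d.items ++ news w l i d := by
  induction l with
  | nil => intro i d; simp [PySem.List.enumerate_nil, news]
  | cons p rest ih =>
    intro i d
    rw [PySem.List.enumerate_cons, List.foldl_cons]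
    by_cases h : (!(w.contains p) && !(d.contains p)) = true
    · have hd : d.contains p = false := by
        rcases Bool.and_eq_true_iff.mp h with ⟨_, h2⟩; simpa using h2
      simp only [h, if_pos, news]
      rw [ih, PySem.Dict.items_insert_of_not_contains _ _ hd]
      simp
    · rw [if_neg h, ih]
      simp [news, h]

-- keys of `news` = ordered dedup of l, filtered to names in neither w nor d
theorem news_keys (w : PySem.Dict String Int) (l : List String) :
    ∀ (i : Int) (d : PySem.Dict String Int),
      (news w l i d).map (·.1)
      = (PySem.Set.ofList l).filter (fun p => !(w.contains p) && !(d.contains p)) := by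
  induction l with
  | nil => intro i d; simp [news, PySem.Set.ofList_nil]
  | cons p rest ih =>
    intro i d
    rw [PySem.Set.ofList_cons]
    unfold news
    by_cases h : (!(w.contains p) && !(d.contains p)) = true
    · rw [if_pos h]
      simp only [List.map_cons, List.filter_cons, h, if_true]
      rw [ih]
      congr 1
      simp only [PySem.Set.discard, List.filter_filter]
      apply List.filter_congr
      intro y _
      rw [PySem.Dict.contains_insert]
      by_cases hy : y = p
      · subst hy; simp
      · cases w.contains y <;> cases d.contains y <;> cases hyy : (y == p) <;> simp_all
    · rw [if_neg h]
      have hb : (!(w.contains p) && !(d.contains p)) = false := by simpa using h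
      simp only [List.filter_cons, hb, Bool.false_eq_true, if_false]
      rw [ih]
      simp only [PySem.Set.discard, List.filter_filter]
      apply List.filter_congr
      intro y _
      by_cases hy : y = p
      · subst hy; simp [hb]
      · simp [hy]

-- every recorded index is ≥ the loop counter
theorem news_ge (w : PySem.Dict String Int) (l : List String) :
    ∀ (i : Int) (d : PySem.Dict String Int) q, q ∈ news w l i d → i ≤ q.2 := by
  induction l with
  | nil => intro i d q hq; simp [news] at hq
  | cons p rest ih =>
    intro i d q hq
    unfold news at hq
    split at hq
    · rcases List.mem_cons.mp hq with h | h
      · subst h; simp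
      · have := ih (i + 1) _ q h; omega
    · have := ih (i + 1) d q hq; omega

-- recorded indices are strictly increasing
theorem news_sorted (w : PySem.Dict String Int) (l : List String) :
    ∀ (i : Int) (d : PySem.Dict String Int),
      (news w l i d).Pairwise (fun a b => a.2 < b.2) := by
  induction l with
  | nil => intro i d; simp [news]
  | cons p rest ih =>
    intro i d
    unfold news
    split
    · refine List.Pairwise.cons ?_ (ih (i + 1) _)
      intro q hq
      have := news_ge w rest (i + 1) _ q hq
      simpa using by omega
    · exact ih (i + 1) d

-- in a strictly increasing Int list, # of elements ≤ the m-th element is m+1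
theorem count_le_of_sorted (vs : List Int) (hs : vs.Pairwise (· < ·)) :
    ∀ m (hm : m < vs.length),
      (vs.filter (fun j => decide (j ≤ vs[m]))).length = m + 1 := by
  induction vs with
  | nil => intro m hm; simp at hm
  | cons v rest ih =>
    intro m hm
    rcases List.pairwise_cons.mp hs with ⟨hv, hrest⟩
    cases m with
    | zero =>
      simp only [List.getElem_cons_zero, List.filter_cons]
      rw [if_pos (by simp)]
      simpa using hv
    | succ m =>
      have hm' : m < rest.length := by simpa using hm
      have hvle : v ≤ rest[m] := le_of_lt (hv _ (List.getElem_mem hm'))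
      simp only [List.getElem_cons_succ, List.filter_cons]
      rw [if_pos (by simpa using hvle)]
      simp only [List.length_cons]
      exact congrArg (fun n => n + 1) (ih hrest m hm')

-- m-th element of enumerate
theorem getElem_enumerate {α : Type} (xs : List α) :
    ∀ (s : Int) (m : Nat) (h : m < (PySem.List.enumerate xs s).length),
      (PySem.List.enumerate xs s)[m]
      = (s + m, xs[m]'(by simpa [PySem.List.length_enumerate] using h)) := by
  induction xs with
  | nil => intro s m h; simp [PySem.List.enumerate_nil] at h
  | cons x rest ih =>
    intro s m h
    cases m with
    | zero => simp [PySem.List.enumerate_cons]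
    | succ m =>
      have h' : m < (PySem.List.enumerate rest (s + 1)).length := by
        have := h
        simp only [PySem.List.length_enumerate, List.length_cons] at this ⊢
        omega
      simp only [PySem.List.enumerate_cons, List.getElem_cons_succ, ih (s + 1) m h',
        Prod.mk.injEq]
      refine ⟨?_, ?_⟩ <;> first | trivial | (push_cast; omega)

-- B's second loop inserts the same (key, value) sequence as enumerate over the keys
theorem pairlist_eq (base : Int) (L : List (String × Int))
    (hs : L.Pairwise (fun a b => a.2 < b.2)) :
    L.map (fun pi => (pi.1, base + (((L.map (·.2)).filter (fun j => decide (j ≤ pi.2))).length : Int)))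
    = (PySem.List.enumerate (L.map (·.1)) (base + 1)).map (fun ip => (ip.2, ip.1)) := by
  have hsv : (L.map (·.2)).Pairwise (· < ·) := List.Pairwise.map _ (fun _ _ h => h) hs
  apply List.ext_getElem
  · simp [PySem.List.length_enumerate]
  · intro m h1 h2
    have hm : m < L.length := by simpa using h1
    have hme : m < (PySem.List.enumerate (L.map (·.1)) (base + 1)).length := by
      simpa [PySem.List.length_enumerate] using hm
    rw [List.getElem_map, List.getElem_map, getElem_enumerate _ _ _ hme]
    have hcv : (L.map (·.2))[m]'(by simpa using hm) = (L[m]'hm).2 := by simp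
    have hcnt := count_le_of_sorted (L.map (·.2)) hsv m (by simpa using hm)
    rw [hcv] at hcnt
    simp only [hcnt, List.getElem_map, Prod.mk.injEq]
    refine ⟨?_, ?_⟩ <;> first | trivial | (push_cast; omega)

-- A's loop counter always equals the current dict size, so A's fold equals the
-- enumerate-over-newcomers assignment, for every starting dict d.
theorem finishes_loop_eq (ranks : List String) :
    ∀ d : PySem.Dict String Int,
      (ranks.foldl
        (fun (st : PySem.Dict String Int × Int) p =>
          if st.1.contains p then st else (st.1.insert p (st.2 + 1), st.2 + 1))
        (d, (d.size : Int))).1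
      = ((PySem.List.enumerate
            ((PySem.List.dedup ranks).filter (fun p => !(d.contains p)))
            ((d.size : Int) + 1)).foldl (fun f ip => f.insert ip.2 ip.1) d) := by
  induction ranks with
  | nil => intro d; simp [PySem.List.dedup, PySem.Set.ofList_nil, PySem.List.enumerate_nil]
  | cons p rest ih =>
    intro d
    simp only [List.foldl_cons, PySem.List.dedup, PySem.Set.ofList_cons]
    by_cases h : d.contains p = true
    · rw [if_pos h]
      have hfilt : ((PySem.Set.ofList rest).discard p).filter (fun y => !(d.contains y))
          = (PySem.Set.ofList rest).filter (fun y => !(d.contains y)) := by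
        simp only [PySem.Set.discard, List.filter_filter]
        apply List.filter_congr
        intro y _
        by_cases hy : y = p
        · subst hy; simp [h]
        · simp [hy]
      simpa [h, hfilt, PySem.List.dedup] using ih d
    · rw [if_neg h]
      have hb : d.contains p = false := by simpa using h
      have hs : ((d.insert p ((d.size : Int) + 1)).size : Int) = (d.size : Int) + 1 := by
        rw [PySem.Dict.size_insert]; simp [hb]
      have ih' := ih (d.insert p ((d.size : Int) + 1))
      rw [hs] at ih'
      rw [ih']
      simp only [List.filter_cons, hb, Bool.not_false, if_pos, PySem.List.enumerate_cons,
        List.foldl_cons, PySem.List.dedup]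
      congr 1
      · simp only [PySem.Set.discard, List.filter_filter]
        congr 1
        apply List.filter_congr
        intro y _
        rw [PySem.Dict.contains_insert]
        by_cases hy : y = p
        · subst hy; simp
        · simp [Bool.and_comm]

-- two insert-folds agree when they insert the same (key, value) sequence
theorem foldl_insert_map_eq {α β : Type} (d : PySem.Dict String Int) (l1 : List α) (l2 : List β)
    (k1 : α → String) (v1 : α → Int) (k2 : β → String) (v2 : β → Int)
    (h : l1.map (fun a => (k1 a, v1 a)) = l2.map (fun b => (k2 b, v2 b))) :
    l1.foldl (fun f a => f.insert (k1 a) (v1 a)) d = l2.foldl (fun f b => f.insert (k2 b) (v2 b)) d := by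
  induction l1 generalizing l2 d with
  | nil =>
    cases l2 with
    | nil => rfl
    | cons b bs => simp at h
  | cons a as ih =>
    cases l2 with
    | nil => simp at h
    | cons b bs =>
      simp only [List.map_cons, List.cons.injEq, Prod.mk.injEq] at h
      obtain ⟨⟨hk, hv⟩, ht⟩ := h
      simp only [List.foldl_cons, hk, hv]
      exact ih _ _ ht

-- ===== VERDICT (by name: the statement is the Claim_ definition above) =====
theorem finishes_spec : Claim_equal_finishes := by
  intro winners ranks _
  unfold Spec_finishes finishes finishes_alt
  simp only []
  set w := PySem.Dict.ofList winners with hw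
  set L := news w ranks 0 PySem.Dict.empty with hL
  have hitems : ((PySem.List.enumerate ranks 0).foldl
      (fun (d : PySem.Dict String Int) ip =>
        if !(w.contains ip.2) && !(d.contains ip.2) then d.insert ip.2 ip.1 else d)
      PySem.Dict.empty).items = L := by
    rw [items_fold_newidx, ← hL]
    simp [PySem.Dict.empty]
  have hvalues : ((PySem.List.enumerate ranks 0).foldl
      (fun (d : PySem.Dict String Int) ip =>
        if !(w.contains ip.2) && !(d.contains ip.2) then d.insert ip.2 ip.1 else d)
      PySem.Dict.empty).values = L.map (·.2) := by
    simp only [PySem.Dict.values, hitems]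
  have hkeys : L.map (·.1) = (PySem.List.dedup ranks).filter (fun p => !(w.contains p)) := by
    rw [hL, news_keys]
    simp [PySem.List.dedup]
  have hsorted : L.Pairwise (fun a b => a.2 < b.2) := news_sorted w ranks 0 PySem.Dict.empty
  have hB : L.foldl
      (fun (f : PySem.Dict String Int) pi =>
        f.insert pi.1 ((w.size : Int) + (((L.map (·.2)).filter (fun j => decide (j ≤ pi.2))).length : Int)))
      w
      = (PySem.List.enumerate (L.map (·.1)) ((w.size : Int) + 1)).foldl
          (fun f ip => f.insert ip.2 ip.1) w :=
    foldl_insert_map_eq w L (PySem.List.enumerate (L.map (·.1)) ((w.size : Int) + 1))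
      (fun pi => pi.1)
      (fun pi => (w.size : Int) + (((L.map (·.2)).filter (fun j => decide (j ≤ pi.2))).length : Int))
      (fun ip => ip.2) (fun ip => ip.1)
      (pairlist_eq (w.size : Int) L hsorted)
  rw [finishes_loop_eq]
  congr 1
  rw [hvalues, hitems, ← hkeys]
  exact hB.symm
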